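-- pv_equiv track=rewrite | github.com/Aryudesu/ABC | ABC/400_499/412/C.py | calc
-- ===== SOURCE A (Python) =====
-- def calc(L, S, R, idx, d):
--     if L * 2 >= R:
--         return d + 1
--     for i in range(idx, len(S)):
--         s = S[i]
--         if s > L * 2:
--             if idx == i:
--                 return -1
--             else:
--                 return calc(S[i-1], S, R, i, d+1)
--     if len(S) > 0:
--         if S[-1] * 2 >= R:
--             return d + 2
--     return -1
-- ===== SOURCE B (Python) =====
-- def calc(L, S, R, idx, d):
--     # Two-pointer single pass: instead of re-scanning from the jump point in a
--     # recursive call, keep one monotone cursor i and the current phase start.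
--     n = len(S)
--     i = idx
--     start = idx
--     while True:
--         if L * 2 >= R:
--             return d + 1
--         if i >= n:
--             if n > 0 and S[-1] * 2 >= R:
--                 return d + 2
--             return -1
--         if S[i] > L * 2:
--             if i == start:
--                 return -1
--             L = S[i - 1]
--             start = i
--             d += 1
--         else:
--             i += 1
-- ===== Notes on version B (the rewrite author's own statement) =====
-- stated objective: alternative
-- what changed: A's tail recursion, which re-scans from the jump point inside each recursive call, is replaced by a single flat two-pointer loop with a monotone cursor and a phase-start marker; the inner for-scan and the recursion both disappear.
import Mathlib
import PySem

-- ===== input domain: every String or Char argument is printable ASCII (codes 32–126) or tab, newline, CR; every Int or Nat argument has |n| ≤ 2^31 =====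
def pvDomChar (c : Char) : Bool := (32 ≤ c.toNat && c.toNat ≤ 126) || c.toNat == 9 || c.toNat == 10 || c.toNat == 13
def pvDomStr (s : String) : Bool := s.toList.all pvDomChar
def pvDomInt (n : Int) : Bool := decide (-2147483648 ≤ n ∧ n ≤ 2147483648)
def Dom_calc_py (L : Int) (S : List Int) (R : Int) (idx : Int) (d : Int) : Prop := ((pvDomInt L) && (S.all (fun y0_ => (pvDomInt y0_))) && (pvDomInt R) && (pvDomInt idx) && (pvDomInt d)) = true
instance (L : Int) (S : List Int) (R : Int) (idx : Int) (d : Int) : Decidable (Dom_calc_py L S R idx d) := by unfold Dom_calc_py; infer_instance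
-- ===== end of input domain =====

-- B replaces A's recursion-with-inner-rescan by one flat two-pointer loop (monotone cursor + phase start);
-- same return values wherever the Python A returns (Pre_ excludes only the inputs where A raises IndexError).

-- ===== PORT A =====
-- A's 'for i in range(idx, len(S)): if S[i] > t: …' — fuel = exact number of remaining range elements (totality device only).
def calcScanA (S : List Int) (t : Int) : Nat → Int → Option Int
  | 0, _ => none
  | n + 1, i => if PySem.List.pyGetD S i 0 > t then some i else calcScanA S t n (i + 1)

-- A's recursion; fuel bounds the recursion depth (idx strictly increases below len(S)), never reached 0 on any return path.
def calcGoA : Nat → Int → List Int → Int → Int → Int → Int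
  | 0, _, _, _, _, _ => -1
  | n + 1, L, S, R, idx, d =>
    if L * 2 ≥ R then d + 1
    else
      match calcScanA S (L * 2) (((S.length : Int) - idx).toNat) idx with
      | some i =>
          if idx = i then -1
          else calcGoA n (PySem.List.pyGetD S (i - 1) 0) S R i (d + 1)
      | none =>
          if S.length > 0 then
            if PySem.List.pyGetD S (-1) 0 * 2 ≥ R then d + 2 else -1
          else -1

def calc_py (L : Int) (S : List Int) (R : Int) (idx : Int) (d : Int) : Int :=
  calcGoA ((((S.length : Int) - idx).toNat) + 1) L S R idx d

-- ===== PORT B =====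
-- B's single 'while True' loop over mutable L, i, start, d; fuel = exact bound on iteration count
-- (each position is visited at most twice: one optional jump plus one advance), never reached 0.
def calcGoB : Nat → Int → List Int → Int → Int → Int → Int → Int
  | 0, _, _, _, _, _, _ => -1
  | f + 1, L, S, R, i, st, d =>
    if L * 2 ≥ R then d + 1
    else if i ≥ (S.length : Int) then
      if S.length > 0 ∧ PySem.List.pyGetD S (-1) 0 * 2 ≥ R then d + 2 else -1
    else if PySem.List.pyGetD S i 0 > L * 2 then
      if i = st then -1
      else calcGoB f (PySem.List.pyGetD S (i - 1) 0) S R i i (d + 1)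
    else calcGoB f L S R (i + 1) st d

def calc_py_alt (L : Int) (S : List Int) (R : Int) (idx : Int) (d : Int) : Int :=
  calcGoB (2 * (((S.length : Int) - idx).toNat) + 2) L S R idx idx d

-- ===== PRECONDITION & SPEC =====
-- Pre_ excludes exactly the inputs where Python A raises IndexError: L*2 < R with idx < -len(S)
-- (the for-loop then reads S[idx] out of range); B raises the same IndexError there.
def Pre_calc_py (L : Int) (S : List Int) (R : Int) (idx : Int) (d : Int) : Prop :=
  L * 2 ≥ R ∨ -(S.length : Int) ≤ idx
instance (L : Int) (S : List Int) (R : Int) (idx : Int) (d : Int) : Decidable (Pre_calc_py L S R idx d) := by unfold Pre_calc_py; infer_instance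
def pvWitness_calc_py : Int × List Int × Int × Int × Int := (1, [3, 5, 9], 10, 0, 0)

def Spec_calc_py (L : Int) (S : List Int) (R : Int) (idx : Int) (d : Int) (out : Int) : Prop := out = calc_py_alt L S R idx d
instance (L : Int) (S : List Int) (R : Int) (idx : Int) (d : Int) (out : Int) : Decidable (Spec_calc_py L S R idx d out) := by unfold Spec_calc_py; infer_instance

-- ===== CLAIM (what is proved, stated in full; the proofs are below) =====
def Claim_equal_calc_py : Prop := ∀ (L : Int) (S : List Int) (R : Int) (idx : Int) (d : Int), Dom_calc_py L S R idx d → Pre_calc_py L S R idx d → Spec_calc_py L S R idx d (calc_py L S R idx d)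

-- ===== LEMMAS AND PROOFS =====

-- fuel that suffices for B's loop from state (i, st): two per remaining position, plus the final return step
def calcNeed (S : List Int) (i st : Int) : Nat :=
  2 * (((S.length : Int) - i).toNat) + (if st = i then 1 else 2)

-- one-step unfolding of B's loop (used to control rewriting)
theorem calcGoB_succ (f : Nat) (L : Int) (S : List Int) (R i st d : Int) :
    calcGoB (f + 1) L S R i st d =
      (if L * 2 ≥ R then d + 1
       else if i ≥ (S.length : Int) then
         if S.length > 0 ∧ PySem.List.pyGetD S (-1) 0 * 2 ≥ R then d + 2 else -1
       else if PySem.List.pyGetD S i 0 > L * 2 then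
         if i = st then -1
         else calcGoB f (PySem.List.pyGetD S (i - 1) 0) S R i i (d + 1)
       else calcGoB f L S R (i + 1) st d) := rfl

theorem calcNeed_bounds (S : List Int) (i st : Int) :
    2 * (((S.length : Int) - i).toNat) + 1 ≤ calcNeed S i st ∧
      calcNeed S i st ≤ 2 * (((S.length : Int) - i).toNat) + 2 := by
  unfold calcNeed; split <;> omega

theorem calcNeed_self (S : List Int) (i : Int) :
    calcNeed S i i = 2 * (((S.length : Int) - i).toNat) + 1 := by
  simp [calcNeed]

-- B's loop is fuel-stable above calcNeed
theorem calcGoB_stable (S : List Int) (R : Int) :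
    ∀ f g L i st d, calcNeed S i st ≤ f → calcNeed S i st ≤ g →
      calcGoB f L S R i st d = calcGoB g L S R i st d := by
  intro f
  induction f using Nat.strong_induction_on with
  | _ f ih =>
    intro g L i st d hf hg
    have hb := calcNeed_bounds S i st
    obtain ⟨f', rfl⟩ : ∃ f', f = f' + 1 := ⟨f - 1, by omega⟩
    obtain ⟨g', rfl⟩ : ∃ g', g = g' + 1 := ⟨g - 1, by omega⟩
    rw [calcGoB_succ f', calcGoB_succ g']
    split
    · rfl
    · split
      · rfl
      · rename_i hR hi
        have hi' : i < (S.length : Int) := by omega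
        split
        · split
          · rfl
          · rename_i hst
            have hne : calcNeed S i st = 2 * (((S.length : Int) - i).toNat) + 2 := by
              unfold calcNeed
              rw [if_neg (fun h => hst h.symm)]
            have hself := calcNeed_self S i
            exact ih f' (by omega) g' _ i i (d + 1) (by omega) (by omega)
        · have hbn := calcNeed_bounds S (i + 1) st
          have harith : (((S.length : Int) - (i + 1)).toNat) + 1 =
              (((S.length : Int) - i).toNat) := by omega
          exact ih f' (by omega) g' L (i + 1) st d (by omega) (by omega)

-- A's scan finds its hit inside the scanned window
theorem calcScanA_bounds (S : List Int) (t : Int) :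
    ∀ (k : Nat) (i j : Int), calcScanA S t k i = some j → i ≤ j ∧ j < i + (k : Int) := by
  intro k
  induction k with
  | zero => intro i j h; simp [calcScanA] at h
  | succ k ih =>
      intro i j h
      simp only [calcScanA] at h
      split at h
      · cases h; constructor <;> push_cast <;> omega
      · have := ih (i + 1) j h; push_cast at this ⊢; omega

-- when A's scan exhausts, B's loop reaches the tail case with the same value
theorem calcGoB_scan_none (S : List Int) (R : Int) :
    ∀ (k : Nat) (i L st d : Int) (f : Nat),
      (((S.length : Int) - i).toNat) = k → calcScanA S (L * 2) k i = none → ¬ L * 2 ≥ R →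
      k + 1 ≤ f →
      calcGoB f L S R i st d =
        (if S.length > 0 ∧ PySem.List.pyGetD S (-1) 0 * 2 ≥ R then d + 2 else -1) := by
  intro k
  induction k with
  | zero =>
      intro i L st d f hk _ hR hf
      obtain ⟨f', rfl⟩ : ∃ f', f = f' + 1 := ⟨f - 1, by omega⟩
      rw [calcGoB_succ f', if_neg hR, if_pos (by omega)]
  | succ k ih =>
      intro i L st d f hk hs hR hf
      obtain ⟨f', rfl⟩ : ∃ f', f = f' + 1 := ⟨f - 1, by omega⟩
      simp only [calcScanA] at hs
      split at hs
      · exact absurd hs (by simp)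
      · rename_i hgt
        rw [calcGoB_succ f', if_neg hR, if_neg (by omega), if_neg hgt]
        exact ih (i + 1) L st d f' (by omega) hs hR (by omega)

-- when A's scan finds j, B's loop reaches the jump decision at j (st carried unchanged)
theorem calcGoB_scan_some (S : List Int) (R : Int) :
    ∀ (k : Nat) (i j L st d : Int) (f : Nat),
      (((S.length : Int) - i).toNat) = k → calcScanA S (L * 2) k i = some j → ¬ L * 2 ≥ R →
      2 * k + 2 ≤ f →
      calcGoB f L S R i st d =
        (if j = st then -1
         else calcGoB (2 * (((S.length : Int) - j).toNat) + 2)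
                (PySem.List.pyGetD S (j - 1) 0) S R j j (d + 1)) := by
  intro k
  induction k with
  | zero => intro i j L st d f _ hs _ _; simp [calcScanA] at hs
  | succ k ih =>
      intro i j L st d f hk hs hR hf
      obtain ⟨f', rfl⟩ : ∃ f', f = f' + 1 := ⟨f - 1, by omega⟩
      simp only [calcScanA] at hs
      rw [calcGoB_succ f', if_neg hR, if_neg (by omega)]
      split at hs
      · rename_i hgt
        cases hs
        rw [if_pos hgt]
        by_cases hst : i = st
        · rw [if_pos hst, if_pos hst]
        · rw [if_neg hst, if_neg hst]
          refine calcGoB_stable S R f' _ _ i i (d + 1) ?_ ?_ <;>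
            rw [calcNeed_self S i] <;> omega
      · rename_i hgt
        rw [if_neg hgt]
        exact ih (i + 1) j L st d f' (by omega) hs hR (by omega)

-- the main simulation: A's recursion equals B's loop, for any sufficient fuels
theorem calcGoA_eq_goB (S : List Int) (R : Int) :
    ∀ (m : Nat) (L idx d : Int) (f : Nat),
      (((S.length : Int) - idx).toNat) + 1 ≤ m →
      2 * (((S.length : Int) - idx).toNat) + 2 ≤ f →
      calcGoA m L S R idx d = calcGoB f L S R idx idx d := by
  intro m
  induction m with
  | zero => intro L idx d f hm _; omega
  | succ m ih =>
      intro L idx d f hm hf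
      simp only [calcGoA]
      by_cases hR : L * 2 ≥ R
      · rw [if_pos hR]
        obtain ⟨f', rfl⟩ : ∃ f', f = f' + 1 := ⟨f - 1, by omega⟩
        rw [calcGoB_succ f', if_pos hR]
      · rw [if_neg hR]
        cases hsc : calcScanA S (L * 2) (((S.length : Int) - idx).toNat) idx with
        | none =>
            rw [calcGoB_scan_none S R _ idx L idx d f rfl hsc hR (by omega)]
            show (if S.length > 0 then
                    if PySem.List.pyGetD S (-1) 0 * 2 ≥ R then d + 2 else -1
                  else -1) = _
            split_ifs with h1 h2 h3 h3 <;> first | rfl | (exfalso; tauto)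
        | some j =>
            rw [calcGoB_scan_some S R _ idx j L idx d f rfl hsc hR hf]
            show (if idx = j then -1
                  else calcGoA m (PySem.List.pyGetD S (j - 1) 0) S R j (d + 1)) = _
            have hb := calcScanA_bounds S (L * 2) _ idx j hsc
            by_cases hj : idx = j
            · rw [if_pos hj, if_pos hj.symm]
            · rw [if_neg hj, if_neg (fun h => hj h.symm)]
              exact ih _ j _ _ (by omega) (by omega)

-- ===== VERDICT (by name: the statement is the Claim_ definition above) =====
theorem calc_py_spec : Claim_equal_calc_py := by
  intro L S R idx d _ _
  unfold Spec_calc_py calc_py calc_py_alt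
  exact calcGoA_eq_goB S R _ L idx d _ (by omega) (by omega)
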